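-- pv_equiv track=rewrite | github.com/josephhewi/Games | EulerProject/Largest product in a grid.py | searchX
-- ===== SOURCE A (Python) =====
-- def listProd(array):
--     if 0 in array:
--         return(0)
--     else:
--         product = 1
--         for number in array:
--             product*=number
--         return(product)
--
-- def searchX(sqrMat,length):
--     high = 0
--     highArray = []
--     for i in range(0,len(sqrMat)-length+1):
--       for j in range(0,len(sqrMat)):
--          testLine = sqrMat[j][i:i+length]
--          testValue = listProd(testLine)
--          if testValue > high:
--              high = testValue
--              highArray = testLine
--     return(high,highArray)
-- ===== SOURCE B (Python) =====
-- def rowPrefix(row):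
--     # prefix products of the non-zero entries, and prefix zero counts
--     p = [1]
--     z = [0]
--     for x in row:
--         p.append(p[-1] * (x if x != 0 else 1))
--         z.append(z[-1] + (1 if x == 0 else 0))
--     return (p, z)
--
-- def searchX(sqrMat, length):
--     n = len(sqrMat)
--     pre = [rowPrefix(row) for row in sqrMat]
--     high = 0
--     highArray = []
--     for i in range(0, n - length + 1):
--         for j in range(0, n):
--             p, z = pre[j]
--             if z[i + length] - z[i] > 0:
--                 val = 0
--             else:
--                 val = p[i + length] // p[i]
--             if val > high:
--                 high = val
--                 highArray = sqrMat[j][i:i + length]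
--     return (high, highArray)
-- ===== Notes on version B (the rewrite author's own statement) =====
-- stated objective: alternative
-- what changed: Instead of re-scanning every length-L slice for zeros and multiplying it out, B precomputes per row a prefix product of the non-zero entries plus a prefix zero count, so each window value is one subtraction and one exact division; Pre_ keeps the natural domain (non-negative window length, no row shorter than the grid height when windows exist) and excludes ragged/negative-length inputs where A's slice clamping and index wraparound return accidental values and B's table indexing raises IndexError.
-- outside the precondition, e.g. on searchX([[1], [2, 3]], 1): A returns (3, [3]), B raises IndexError; on searchX([[1, 2], [3, 4]], -1): A returns (3, [3]), B raises IndexError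
import Mathlib
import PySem

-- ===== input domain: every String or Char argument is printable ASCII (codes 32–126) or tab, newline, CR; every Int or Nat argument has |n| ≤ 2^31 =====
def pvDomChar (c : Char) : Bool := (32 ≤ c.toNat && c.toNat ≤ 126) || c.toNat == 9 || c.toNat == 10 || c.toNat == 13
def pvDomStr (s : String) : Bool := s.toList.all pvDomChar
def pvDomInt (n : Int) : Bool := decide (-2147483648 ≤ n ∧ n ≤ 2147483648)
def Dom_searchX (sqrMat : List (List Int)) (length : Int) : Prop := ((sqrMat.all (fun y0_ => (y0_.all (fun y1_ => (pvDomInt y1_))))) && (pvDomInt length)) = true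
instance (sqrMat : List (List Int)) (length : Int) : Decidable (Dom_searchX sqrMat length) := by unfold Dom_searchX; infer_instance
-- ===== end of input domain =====

-- B replaces A's per-window rescans by per-row prefix products of the non-zero
-- entries plus prefix zero counts, so each window value is one subtraction and
-- one exact division.

-- ===== PORT A =====
def listProd (array : List Int) : Int :=
  if 0 ∈ array then 0
  else array.foldl (fun product number => product * number) 1

def searchX (sqrMat : List (List Int)) (length : Int) : Int × List Int :=
  (PySem.List.pyRange 0 (PySem.List.len sqrMat - length + 1) 1).foldl
    (fun st i =>
      (PySem.List.pyRange 0 (PySem.List.len sqrMat) 1).foldl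
        (fun st j =>
          let testLine := PySem.List.slice (PySem.List.pyGetD sqrMat j [])
              (some i) (some (i + length))
          let testValue := listProd testLine
          if testValue > st.1 then (testValue, testLine) else st)
        st)
    (0, [])

-- ===== PORT B =====
-- per row: prefix products of the non-zero entries, and prefix zero counts
def rowPrefix (row : List Int) : List Int × List Int :=
  row.foldl
    (fun pz x =>
      (pz.1 ++ [PySem.List.pyGetD pz.1 (-1) 1 * (if x ≠ 0 then x else 1)],
       pz.2 ++ [PySem.List.pyGetD pz.2 (-1) 0 + (if x = 0 then 1 else 0)]))
    ([1], [0])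

def searchX_alt (sqrMat : List (List Int)) (length : Int) : Int × List Int :=
  let n := PySem.List.len sqrMat
  let pre := sqrMat.map rowPrefix
  (PySem.List.pyRange 0 (n - length + 1) 1).foldl
    (fun st i =>
      (PySem.List.pyRange 0 n 1).foldl
        (fun st j =>
          let pz := PySem.List.pyGetD pre j ([1], [0])
          let val :=
            if PySem.List.pyGetD pz.2 (i + length) 0 - PySem.List.pyGetD pz.2 i 0 > 0 then 0
            else PySem.Int.floordiv (PySem.List.pyGetD pz.1 (i + length) 1)
                   (PySem.List.pyGetD pz.1 i 1)
          if val > st.1 then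
            (val, PySem.List.slice (PySem.List.pyGetD sqrMat j []) (some i) (some (i + length)))
          else st)
        st)
    (0, [])

-- ===== PRECONDITION & SPEC =====
-- Pre_ keeps the natural domain: a non-negative window length and, whenever windows
-- exist (length ≤ number of rows), no row shorter than the grid height; outside it A's
-- values come from silent slice clamping / negative-index wraparound (accidental for a
-- square-grid search) and B's prefix-table indexing raises IndexError.
def Pre_searchX (sqrMat : List (List Int)) (length : Int) : Prop :=
  0 ≤ length ∧ (length ≤ (sqrMat.length : Int) →
    ∀ row ∈ sqrMat, sqrMat.length ≤ row.length)
instance (sqrMat : List (List Int)) (length : Int) : Decidable (Pre_searchX sqrMat length) := by unfold Pre_searchX; infer_instance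
def pvWitness_searchX : List (List Int) × Int := ([[1, 2], [3, 4]], 2)

def Spec_searchX (sqrMat : List (List Int)) (length : Int) (out : Int × List Int) : Prop := out = searchX_alt sqrMat length
instance (sqrMat : List (List Int)) (length : Int) (out : Int × List Int) : Decidable (Spec_searchX sqrMat length out) := by unfold Spec_searchX; infer_instance

-- ===== CLAIM (what is proved, stated in full; the proofs are below) =====
def Claim_equal_searchX : Prop := ∀ (sqrMat : List (List Int)) (length : Int), Dom_searchX sqrMat length → Pre_searchX sqrMat length → Spec_searchX sqrMat length (searchX sqrMat length)

-- ===== LEMMAS AND PROOFS =====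

-- the "zero-protected" factor used by the prefix products
def pvF (x : Int) : Int := if x ≠ 0 then x else 1

def pvScanP : Int → List Int → List Int
  | _, [] => []
  | c, x :: r => (c * pvF x) :: pvScanP (c * pvF x) r

def pvScanZ : Int → List Int → List Int
  | _, [] => []
  | d, x :: r => (d + (if x = 0 then 1 else 0)) :: pvScanZ (d + (if x = 0 then 1 else 0)) r

def pvPc (l : List Int) : Int := (l.map pvF).prod
def pvZc (l : List Int) : Int := (l.map (fun x => if x = 0 then (1:Int) else 0)).sum

lemma pvF_ne_zero (x : Int) : pvF x ≠ 0 := by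
  unfold pvF; split_ifs with h <;> simp [h]

lemma pvPc_ne_zero (l : List Int) : pvPc l ≠ 0 := by
  unfold pvPc
  refine List.prod_ne_zero (fun hy => ?_)
  rcases List.mem_map.mp hy with ⟨x, _, hx⟩
  exact pvF_ne_zero x hx

lemma pvZc_nonneg (l : List Int) : 0 ≤ pvZc l := by
  induction l with
  | nil => simp [pvZc]
  | cons x r ih => simp only [pvZc, List.map_cons, List.sum_cons] at *; split_ifs <;> omega

lemma pvZc_pos_iff (l : List Int) : 0 < pvZc l ↔ 0 ∈ l := by
  induction l with
  | nil => simp [pvZc]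
  | cons x r ih =>
    have h := pvZc_nonneg r
    simp only [pvZc, List.map_cons, List.sum_cons, List.mem_cons] at *
    split_ifs with hx
    · constructor
      · intro _; exact Or.inl hx.symm
      · intro _; omega
    · constructor
      · intro hpos; exact Or.inr (ih.mp (by omega))
      · rintro (h0 | h0)
        · exact absurd h0.symm hx
        · have := ih.mpr h0; omega

lemma rowPrefix_foldl (r : List Int) :
    ∀ (p z : List Int) (c d : Int),
    r.foldl
      (fun pz x =>
        (pz.1 ++ [PySem.List.pyGetD pz.1 (-1) 1 * (if x ≠ 0 then x else 1)],
         pz.2 ++ [PySem.List.pyGetD pz.2 (-1) 0 + (if x = 0 then 1 else 0)]))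
      (p ++ [c], z ++ [d])
    = (p ++ c :: pvScanP c r, z ++ d :: pvScanZ d r) := by
  induction r with
  | nil => intro p z c d; simp [pvScanP, pvScanZ]
  | cons x r ih =>
    intro p z c d
    simp only [List.foldl_cons, PySem.List.pyGetD_neg_one_append_singleton]
    have h1 : p ++ [c] ++ [c * (if x ≠ 0 then x else 1)]
        = (p ++ [c]) ++ [c * (if x ≠ 0 then x else 1)] := rfl
    have h2 : z ++ [d] ++ [d + (if x = 0 then 1 else 0)]
        = (z ++ [d]) ++ [d + (if x = 0 then 1 else 0)] := rfl
    rw [h1, h2, ih]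
    simp [pvScanP, pvScanZ, pvF, List.append_assoc]

lemma rowPrefix_eq (r : List Int) :
    rowPrefix r = (1 :: pvScanP 1 r, 0 :: pvScanZ 0 r) := by
  have := rowPrefix_foldl r [] [] 1 0
  simpa [rowPrefix] using this

lemma pvScanP_length (c : Int) (r : List Int) : (pvScanP c r).length = r.length := by
  induction r generalizing c with
  | nil => simp [pvScanP]
  | cons x r ih => simp [pvScanP, ih]

lemma pvScanZ_length (d : Int) (r : List Int) : (pvScanZ d r).length = r.length := by
  induction r generalizing d with
  | nil => simp [pvScanZ]
  | cons x r ih => simp [pvScanZ, ih]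

lemma pvScanP_getD (r : List Int) : ∀ (c : Int) (k : Nat), k ≤ r.length →
    (c :: pvScanP c r).getD k 1 = c * pvPc (r.take k) := by
  induction r with
  | nil =>
    intro c k hk
    have : k = 0 := by simpa using hk
    subst this
    simp [pvPc]
  | cons x r ih =>
    intro c k hk
    cases k with
    | zero => simp [pvPc]
    | succ k =>
      have hk' : k ≤ r.length := by simpa using hk
      have : ((c * pvF x) :: pvScanP (c * pvF x) r).getD k 1
          = (c * pvF x) * pvPc (r.take k) := ih (c * pvF x) k hk'
      simp only [pvScanP, List.getD_cons_succ] at *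
      rw [this]
      simp [pvPc, mul_assoc]

lemma pvScanZ_getD (r : List Int) : ∀ (d : Int) (k : Nat), k ≤ r.length →
    (d :: pvScanZ d r).getD k 0 = d + pvZc (r.take k) := by
  induction r with
  | nil =>
    intro d k hk
    have : k = 0 := by simpa using hk
    subst this
    simp [pvZc]
  | cons x r ih =>
    intro d k hk
    cases k with
    | zero => simp [pvZc]
    | succ k =>
      have hk' : k ≤ r.length := by simpa using hk
      have : ((d + (if x = 0 then 1 else 0)) :: pvScanZ (d + (if x = 0 then 1 else 0)) r).getD k 0
          = (d + (if x = 0 then 1 else 0)) + pvZc (r.take k) := ih _ k hk'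
      simp only [pvScanZ, List.getD_cons_succ] at *
      rw [this]
      simp [pvZc, add_assoc]

lemma pv_floordiv_mul_cancel (c s : Int) (hc : c ≠ 0) :
    PySem.Int.floordiv (c * s) c = s := by
  have h := PySem.Int.floordiv_mul_add_mod (c * s) c
  have hm : PySem.Int.mod (c * s) c = 0 :=
    (PySem.Int.mod_eq_zero_iff_dvd _ _).mpr ⟨s, rfl⟩
  rw [hm, add_zero] at h
  have : PySem.Int.floordiv (c * s) c * c = s * c := by linarith [h, mul_comm c s]
  exact mul_right_cancel₀ hc this

-- window product from prefix products / prefix zero counts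
lemma pv_val_spec (r : List Int) (A B : Nat) (hAB : A ≤ B) :
    (if 0 < (0 + pvZc (r.take B)) - (0 + pvZc (r.take A)) then 0
     else PySem.Int.floordiv (1 * pvPc (r.take B)) (1 * pvPc (r.take A)))
    = listProd ((r.drop A).take (B - A)) := by
  set seg := (r.drop A).take (B - A) with hseg
  have htake : r.take B = r.take A ++ seg := by
    rw [hseg, ← List.take_add]
    congr 1
    omega
  have hZ : pvZc (r.take B) = pvZc (r.take A) + pvZc seg := by
    rw [htake]; simp [pvZc]
  have hP : pvPc (r.take B) = pvPc (r.take A) * pvPc seg := by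
    rw [htake]; simp [pvPc]
  by_cases h0 : (0:Int) ∈ seg
  · have hpos : 0 < pvZc seg := (pvZc_pos_iff seg).mpr h0
    rw [if_pos (by omega)]
    simp [listProd, h0]
  · have hz : pvZc seg = 0 := by
      have := pvZc_nonneg seg
      have := (pvZc_pos_iff seg).not.mpr h0
      omega
    rw [if_neg (by omega)]
    have hmap : seg.map pvF = seg := by
      conv_rhs => rw [← List.map_id seg]
      apply List.map_congr_left
      intro x hx
      have hx0 : x ≠ 0 := fun h => h0 (h ▸ hx)
      simp [pvF, hx0]
    have hprod : pvPc seg = seg.prod := by rw [pvPc, hmap]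
    have hlp : listProd seg = seg.prod := by
      simp only [listProd, if_neg h0]
      rw [List.prod_eq_foldl]
    rw [one_mul, one_mul, hP, pv_floordiv_mul_cancel _ _ (pvPc_ne_zero _), hprod, hlp]

-- the per-cell agreement: B's prefix-table window value equals A's rescanned product
lemma pv_cell (row : List Int) (i length : Int)
    (hi : 0 ≤ i) (hl : 0 ≤ length) (hb : i + length ≤ (row.length : Int)) :
    (if PySem.List.pyGetD (rowPrefix row).2 (i + length) 0
          - PySem.List.pyGetD (rowPrefix row).2 i 0 > 0 then 0
     else PySem.Int.floordiv (PySem.List.pyGetD (rowPrefix row).1 (i + length) 1)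
            (PySem.List.pyGetD (rowPrefix row).1 i 1))
    = listProd (PySem.List.slice row (some i) (some (i + length))) := by
  rw [rowPrefix_eq]
  have hlenP : (1 :: pvScanP 1 row).length = row.length + 1 := by
    simp [pvScanP_length]
  have hlenZ : (0 :: pvScanZ 0 row).length = row.length + 1 := by
    simp [pvScanZ_length]
  have hgP : ∀ (c : Int), 0 ≤ c → c ≤ (row.length : Int) →
      PySem.List.pyGetD (1 :: pvScanP 1 row) c 1 = 1 * pvPc (row.take c.toNat) := by
    intro c hc0 hcm
    rw [PySem.List.pyGetD_eq_getElem _ _ hc0 (by rw [hlenP]; omega)]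
    rw [← List.getD_eq_getElem _ 1 (by rw [hlenP]; omega)]
    exact pvScanP_getD row 1 c.toNat (by omega)
  have hgZ : ∀ (c : Int), 0 ≤ c → c ≤ (row.length : Int) →
      PySem.List.pyGetD (0 :: pvScanZ 0 row) c 0 = 0 + pvZc (row.take c.toNat) := by
    intro c hc0 hcm
    rw [PySem.List.pyGetD_eq_getElem _ _ hc0 (by rw [hlenZ]; omega)]
    rw [← List.getD_eq_getElem _ 0 (by rw [hlenZ]; omega)]
    exact pvScanZ_getD row 0 c.toNat (by omega)
  have hsl : PySem.List.slice row (some i) (some (i + length))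
      = (row.drop i.toNat).take ((i + length).toNat - i.toNat) :=
    PySem.List.slice_toNat row hi (by omega)
  rw [hgP i hi (by omega), hgP (i + length) (by omega) hb,
      hgZ i hi (by omega), hgZ (i + length) (by omega) hb, hsl]
  exact pv_val_spec row i.toNat (i + length).toNat (by omega)

theorem pv_main : ∀ (sqrMat : List (List Int)) (length : Int),
    Pre_searchX sqrMat length → searchX sqrMat length = searchX_alt sqrMat length := by
  intro sqrMat length hpre
  obtain ⟨hl, hrows⟩ := hpre
  simp only [searchX, searchX_alt]
  apply PySem.List.foldl_congr_mem
  intro acc i himem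
  have hi := PySem.List.mem_pyRange_one.mp himem
  have hrange : length ≤ (sqrMat.length : Int) := by
    rw [PySem.List.len_eq] at hi; omega
  apply PySem.List.foldl_congr_mem
  intro acc' j hjmem
  have hj := PySem.List.mem_pyRange_one.mp hjmem
  have hj1' : j < (sqrMat.length : Int) := by have := hj.2; rwa [PySem.List.len_eq] at this
  have hpre : PySem.List.pyGetD (sqrMat.map rowPrefix) j ([1], [0])
      = rowPrefix (PySem.List.pyGetD sqrMat j []) := by
    rw [PySem.List.pyGetD_eq_getElem _ _ hj.1 (by simpa using hj1'),
        PySem.List.pyGetD_eq_getElem _ _ hj.1 (by exact_mod_cast hj1'),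
        List.getElem_map]
  rw [hpre]
  have hmem : PySem.List.pyGetD sqrMat j [] ∈ sqrMat := by
    rw [PySem.List.pyGetD_eq_getElem _ _ hj.1 (by exact_mod_cast hj1')]
    exact List.getElem_mem _
  have hrowlen : (sqrMat.length : Int) ≤ ((PySem.List.pyGetD sqrMat j []).length : Int) := by
    exact_mod_cast hrows hrange _ hmem
  have hcell := pv_cell (PySem.List.pyGetD sqrMat j []) i length hi.1 hl
    (by rw [PySem.List.len_eq] at hi; omega)
  rw [hcell]

-- ===== VERDICT (by name: the statement is the Claim_ definition above) =====
theorem searchX_spec : Claim_equal_searchX := by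
  intro sqrMat length _ hpre
  unfold Spec_searchX
  exact pv_main sqrMat length hpre
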